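-- pv_equiv track=rewrite | github.com/r-k-g/advent-of-code | events/2016/day4.py | shift_words
-- ===== SOURCE A (Python) =====
-- def shift_words(encrypted, shift):
--     shift = shift % 25
--
--     decrypted = []
--
--     words = encrypted.split("-")
--     for w in words:
--         word = []
--         for c in w:
--             word.append(chr(97 + ((ord(c) - 97 + shift) % 26)))
--         decrypted.append("".join(word))
--
--     return " ".join(decrypted)
-- ===== SOURCE B (Python) =====
-- def shift_words(encrypted, shift):
--     shift = shift % 25
--     return "".join(
--         " " if c == "-" else chr(97 + ((ord(c) - 97 + shift) % 26))
--         for c in encrypted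
--     )
-- ===== Notes on version B (the rewrite author's own statement) =====
-- stated objective: simpler
-- what changed: Replaces split('-')/nested word loops/' '.join with one flat pass over the string that maps '-' to ' ' and shifts every other character inline.
import Mathlib
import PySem

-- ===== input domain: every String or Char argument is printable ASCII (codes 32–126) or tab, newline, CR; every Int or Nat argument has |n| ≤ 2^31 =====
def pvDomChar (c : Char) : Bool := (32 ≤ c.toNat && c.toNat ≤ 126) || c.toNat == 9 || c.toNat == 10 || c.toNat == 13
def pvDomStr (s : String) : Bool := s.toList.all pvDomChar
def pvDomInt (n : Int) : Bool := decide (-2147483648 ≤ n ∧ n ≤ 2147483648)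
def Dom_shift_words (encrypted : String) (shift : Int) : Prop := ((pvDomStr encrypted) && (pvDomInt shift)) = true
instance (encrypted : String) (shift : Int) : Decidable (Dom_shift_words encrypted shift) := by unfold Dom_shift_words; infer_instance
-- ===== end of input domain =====

-- B replaces A's split-on-'-'/nested-loops/join structure by one flat pass over the string (simpler, same cost).

-- ===== PORT A =====
-- literal port of A: shift = shift % 25; split on "-"; nested append loops; " ".join
def shift_words (encrypted : String) (shift : Int) : String :=
  let s := PySem.Int.mod shift 25
  let words := PySem.Chars.splitOn encrypted.toList ['-']
  let decrypted := words.foldl (fun acc w =>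
    acc ++ [w.foldl (fun word c =>
      word ++ [Char.ofNat (97 + (PySem.Int.mod ((c.toNat : Int) - 97 + s) 26)).toNat]) []]) []
  String.mk (PySem.Chars.join [' '] decrypted)

-- ===== PORT B =====
-- literal port of B: one comprehension over the characters, '-' ↦ ' ', else the shifted char
def shift_words_alt (encrypted : String) (shift : Int) : String :=
  let s := PySem.Int.mod shift 25
  String.mk (encrypted.toList.map (fun c =>
    if c = '-' then ' '
    else Char.ofNat (97 + (PySem.Int.mod ((c.toNat : Int) - 97 + s) 26)).toNat))

-- ===== PRECONDITION & SPEC =====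
def Spec_shift_words (encrypted : String) (shift : Int) (out : String) : Prop := out = shift_words_alt encrypted shift
instance (encrypted : String) (shift : Int) (out : String) : Decidable (Spec_shift_words encrypted shift out) := by unfold Spec_shift_words; infer_instance

-- ===== CLAIM (what is proved, stated in full; the proofs are below) =====
def Claim_equal_shift_words : Prop := ∀ (encrypted : String) (shift : Int), Dom_shift_words encrypted shift → Spec_shift_words encrypted shift (shift_words encrypted shift)

-- ===== LEMMAS AND PROOFS =====

-- PySem's fuel-based single-character split is Mathlib's List.splitOn, up to the accumulators.
theorem splitOn_go_single (d : Char) :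
    ∀ (fuel : Nat) (l cur : List Char) (acc : List (List Char)), l.length < fuel →
      PySem.Chars.splitOn.go [d] fuel l cur acc
        = acc.reverse ++ (l.splitOn d).modifyHead (cur.reverse ++ ·) := by
  intro fuel
  induction fuel with
  | zero => intro l cur acc h; omega
  | succ fuel ih =>
    intro l cur acc h
    cases l with
    | nil =>
      simp [PySem.Chars.splitOn.go, List.splitOn_nil]
    | cons c rest =>
      by_cases hc : d = c
      · subst hc
        rw [show PySem.Chars.splitOn.go [d] (fuel+1) (d :: rest) cur acc
              = PySem.Chars.splitOn.go [d] fuel rest [] (cur.reverse :: acc) by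
            simp [PySem.Chars.splitOn.go, List.isPrefixOf]]
        rw [ih rest [] (cur.reverse :: acc) (by simpa using Nat.lt_of_succ_lt_succ h)]
        simp [List.splitOn, List.splitOnP_cons]
        exact congrFun List.modifyHead_id _
      · rw [show PySem.Chars.splitOn.go [d] (fuel+1) (c :: rest) cur acc
              = PySem.Chars.splitOn.go [d] fuel rest (c :: cur) acc by
            simp [PySem.Chars.splitOn.go, List.isPrefixOf, hc]]
        rw [ih rest (c :: cur) acc (by simpa using Nat.lt_of_succ_lt_succ h)]
        have hc' : ¬ (c = d) := fun h' => hc h'.symm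
        simp [List.splitOn, List.splitOnP_cons, hc', List.modifyHead_modifyHead]
        congr 1

theorem splitOn_single (d : Char) (l : List Char) :
    PySem.Chars.splitOn l [d] = l.splitOn d := by
  rw [PySem.Chars.splitOn, splitOn_go_single d (l.length + 1) l [] [] (by omega)]
  rw [show (fun x : List Char => List.reverse [] ++ x) = fun x : List Char => x by funext x; simp]
  rw [List.reverse_nil, List.nil_append]
  exact congrFun List.modifyHead_id _

-- pull the head character of the first chunk out of the join
theorem join_cons_head (r a : Char) (x : List Char) (X : List (List Char)) :
    PySem.Chars.join [r] ((a :: x) :: X) = a :: PySem.Chars.join [r] (x :: X) := by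
  cases X with
  | nil => simp [PySem.Chars.join_singleton]
  | cons q t => simp [PySem.Chars.join_cons_cons]

-- joining the per-chunk-mapped split with a one-character separator is a flat map
theorem join_splitOn_map (g : Char → Char) (d r : Char) :
    ∀ l : List Char,
      PySem.Chars.join [r] ((l.splitOn d).map (List.map g))
        = l.map (fun c => if c = d then r else g c) := by
  intro l
  induction l with
  | nil => simp [List.splitOn_nil, PySem.Chars.join_singleton]
  | cons c rest ih =>
    rcases hq : rest.splitOn d with _ | ⟨q, t⟩
    · exact absurd hq (List.splitOnP_ne_nil _ _)
    · by_cases hc : c = d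
      · subst hc
        rw [show (c :: rest).splitOn c = [] :: rest.splitOn c by
              simp [List.splitOn, List.splitOnP_cons]]
        rw [hq] at ih ⊢
        simp only [List.map_cons, PySem.Chars.join_cons_cons] at ih ⊢
        simp [ih]
      · have hc' : ¬ (c = d) := hc
        rw [show (c :: rest).splitOn d = (rest.splitOn d).modifyHead (c :: ·) by
              simp [List.splitOn, List.splitOnP_cons, hc']]
        rw [hq] at ih ⊢
        simp only [List.modifyHead_cons, List.map_cons, join_cons_head] at ih ⊢
        simp [ih, hc]

theorem shift_words_spec : Claim_equal_shift_words := by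
  intro encrypted shift _
  unfold Spec_shift_words shift_words shift_words_alt
  simp only [PySem.List.foldl_append_singleton_eq_map, splitOn_single, List.nil_append]
  rw [join_splitOn_map]
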